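-- pv_equiv track=rewrite | github.com/AtlasOfLivingAustralia/pipelines-airflow | dags/generate_parquet_dag.py | _sanitize_spark_submit_args
-- ===== SOURCE A (Python) =====
-- def _sanitize_spark_submit_args(args: str) -> str:
--     if not args:
--         return ""
--     cleaned = args.replace("\r", " ").replace("\n", " ")
--     # Replace common equals patterns with space
--     for opt in [
--         "--num-executors",
--         "--executor-cores",
--         "--executor-memory",
--         "--driver-memory",
--         "--driver-cores",
--         "--total-executor-cores",
--     ]:
--         cleaned = cleaned.replace(f"{opt}=", f"{opt} ")
--     # Collapse repeated whitespace
--     cleaned = " ".join(cleaned.split())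
--     return cleaned
-- ===== SOURCE B (Python) =====
-- import re
--
-- # One compiled pattern: a single left-to-right scan turns each option's trailing
-- # equals sign into a space (first-alternative order); str.split() then collapses
-- # all whitespace, carriage returns and newlines included, in one pass.
-- _OPT_EQ_RE = re.compile(
--     r"(--(?:num-executors|executor-cores|executor-memory"
--     r"|driver-memory|driver-cores|total-executor-cores))="
-- )
--
--
-- def _sanitize_spark_submit_args(args: str) -> str:
--     if not args:
--         return ""
--     return " ".join(_OPT_EQ_RE.sub(r"\1 ", args).split())
-- ===== Notes on version B (the rewrite author's own statement) =====
-- stated objective: idiomatic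
-- what changed: The six sequential whole-string str.replace passes plus the two newline-replace passes are collapsed into one compiled regex alternation that, in a single left-to-right scan, turns each option's equals sign into a space, letting str.split() absorb carriage returns and newlines together with the whitespace collapse.
import Mathlib
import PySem

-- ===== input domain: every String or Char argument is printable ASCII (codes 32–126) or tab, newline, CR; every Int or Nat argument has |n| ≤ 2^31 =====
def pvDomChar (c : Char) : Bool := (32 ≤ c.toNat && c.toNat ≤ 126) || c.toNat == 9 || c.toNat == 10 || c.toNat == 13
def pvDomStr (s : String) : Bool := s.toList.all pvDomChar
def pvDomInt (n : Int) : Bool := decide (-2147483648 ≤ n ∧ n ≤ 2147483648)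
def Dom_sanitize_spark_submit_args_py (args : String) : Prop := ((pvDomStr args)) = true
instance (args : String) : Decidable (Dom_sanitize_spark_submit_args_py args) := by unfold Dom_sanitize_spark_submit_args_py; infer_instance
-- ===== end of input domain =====

-- B replaces A's six sequential whole-string str.replace passes (plus the two newline passes)
-- with ONE left-to-right scan (a compiled regex alternation in Python, str.split() absorbing
-- the newline characters); objective: idiomatic single pass. Return values proved equal.

-- ===== PORT A =====
def pvAOpts : List String :=
  ["--num-executors", "--executor-cores", "--executor-memory",
   "--driver-memory", "--driver-cores", "--total-executor-cores"]

def sanitize_spark_submit_args_py (args : String) : String :=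
  -- if not args: return ""
  if args = "" then ""
  else
    -- cleaned = args.replace("\r", " ").replace("\n", " ")
    -- for opt in [...]: cleaned = cleaned.replace(f"{opt}=", f"{opt} ")
    -- return " ".join(cleaned.split())
    PySem.Str.join " "
      (PySem.Str.split₀
        (pvAOpts.foldl (fun c opt => PySem.Str.replace c (opt ++ "=") (opt ++ " "))
          (PySem.Str.replace (PySem.Str.replace args "\r" " ") "\n" " ")))

-- ===== PORT B =====
-- the regex alternatives of _OPT_EQ_RE, in pattern order
def pvRegexAlts : List String :=
  ["--num-executors", "--executor-cores", "--executor-memory",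
   "--driver-memory", "--driver-cores", "--total-executor-cores"]

-- the literal strings the alternation can match: each alternative followed by '='
def pvPats : List (List Char) := pvRegexAlts.map (fun o => o.toList ++ ['='])

-- _OPT_EQ_RE.sub(r"\1 ", ·) as a single left-to-right scan: at each position try the
-- alternatives in order; on a match emit the captured group and ' ' and resume after the
-- match, otherwise copy the character
def pvScan (ps : List (List Char)) : List Char → List Char
  | [] => []
  | c :: t =>
    match ps.find? (fun p => p.isPrefixOf (c :: t)) with
    | some p => p.dropLast ++ [' '] ++ pvScan ps (t.drop (p.length - 1))
    | none => c :: pvScan ps t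
termination_by s => s.length
decreasing_by
  · simp
  · simp

-- " ".join(_OPT_EQ_RE.sub(r"\1 ", args).split())
def sanitize_spark_submit_args_py_alt (args : String) : String :=
  PySem.Str.join " " (PySem.Str.split₀ (String.ofList (pvScan pvPats args.toList)))

-- ===== PRECONDITION & SPEC =====
def Spec_sanitize_spark_submit_args_py (args : String) (out : String) : Prop := out = sanitize_spark_submit_args_py_alt args
instance (args : String) (out : String) : Decidable (Spec_sanitize_spark_submit_args_py args out) := by unfold Spec_sanitize_spark_submit_args_py; infer_instance

-- ===== CLAIM (what is proved, stated in full; the proofs are below) =====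
def Claim_equal_sanitize_spark_submit_args_py : Prop := ∀ (args : String), Dom_sanitize_spark_submit_args_py args → Spec_sanitize_spark_submit_args_py args (sanitize_spark_submit_args_py args)

-- ===== LEMMAS AND PROOFS =====

def repc (p n : List Char) : List Char → List Char
  | [] => []
  | c :: t =>
    if p.isPrefixOf (c :: t) then n ++ repc p n (t.drop (p.length - 1))
    else c :: repc p n t
termination_by s => s.length
decreasing_by
  · simp
  · simp

theorem repc_nil (p n : List Char) : repc p n [] = [] := by simp [repc]

theorem repc_pos (p n : List Char) (c : Char) (t : List Char) (hp : p ≠ [])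
    (h : p <+: (c :: t)) :
    repc p n (c :: t) = n ++ repc p n ((c :: t).drop p.length) := by
  rw [repc]
  rw [if_pos (List.isPrefixOf_iff_prefix.mpr h)]
  obtain ⟨k, hk⟩ : ∃ k, p.length = k + 1 := ⟨p.length - 1, by have := List.length_pos_iff.mpr hp; omega⟩
  rw [hk]
  simp

theorem repc_neg (p n : List Char) (c : Char) (t : List Char) (h : ¬ p <+: (c :: t)) :
    repc p n (c :: t) = c :: repc p n t := by
  rw [repc, if_neg (by simpa [List.isPrefixOf_iff_prefix] using h)]

theorem replace_go_eq (p n : List Char) (hp : p ≠ []) :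
    ∀ fuel s acc, s.length ≤ fuel →
      PySem.Chars.replace.go p n fuel s acc = acc.reverse ++ repc p n s := by
  intro fuel
  induction fuel with
  | zero =>
    intro s acc h
    have : s = [] := List.length_eq_zero_iff.mp (Nat.le_zero.mp h)
    subst this
    simp [PySem.Chars.replace.go, repc_nil p n]
  | succ m ih =>
    intro s acc h
    match s with
    | [] => simp [PySem.Chars.replace.go, repc_nil p n]
    | c :: t =>
      rw [PySem.Chars.replace.go]
      by_cases hpre : p <+: (c :: t)
      · rw [if_pos (List.isPrefixOf_iff_prefix.mpr hpre)]
        rw [ih _ _ (by have h1 := List.length_pos_iff.mpr hp; simp at h ⊢; omega)]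
        rw [repc_pos p n c t hp hpre]
        simp
      · rw [if_neg (by simpa [List.isPrefixOf_iff_prefix] using hpre)]
        rw [ih _ _ (by simp at h ⊢; omega)]
        rw [repc_neg p n c t hpre]
        simp

theorem replace_eq_repc (p n s : List Char) (hp : p ≠ []) :
    PySem.Chars.replace s p n = repc p n s := by
  rw [PySem.Chars.replace, if_neg (by simpa [List.isEmpty_iff] using hp)]
  simpa using replace_go_eq p n hp s.length s [] le_rfl

theorem pvScan_nil (ps : List (List Char)) : pvScan ps [] = [] := by simp [pvScan]

theorem pvScan_pos (ps : List (List Char)) (c : Char) (t : List Char) (r : List Char)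
    (hr : r ≠ []) (h : ps.find? (fun p => p.isPrefixOf (c :: t)) = some r) :
    pvScan ps (c :: t) = r.dropLast ++ [' '] ++ pvScan ps ((c :: t).drop r.length) := by
  rw [pvScan, h]
  obtain ⟨k, hk⟩ : ∃ k, r.length = k + 1 := ⟨r.length - 1, by have := List.length_pos_iff.mpr hr; omega⟩
  simp [hk]

theorem pvScan_neg (ps : List (List Char)) (c : Char) (t : List Char)
    (h : ps.find? (fun p => p.isPrefixOf (c :: t)) = none) :
    pvScan ps (c :: t) = c :: pvScan ps t := by
  rw [pvScan, h]

-- repc distributes over ++ when the needle matches at no position inside u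
theorem repc_append (p n : List Char) :
    ∀ u v : List Char, (∀ j, j < u.length → ¬ p <+: (u ++ v).drop j) →
      repc p n (u ++ v) = u ++ repc p n v := by
  intro u
  induction u with
  | nil => simp
  | cons c u' ih =>
    intro v h
    rw [List.cons_append, repc_neg p n c (u' ++ v) (by simpa using h 0 (by simp))]
    rw [ih v (fun j hj => by simpa using h (j + 1) (by simp; omega))]
    simp

-- pvScan distributes over ++ when no pattern matches at any position inside u
theorem pvScan_append (ps : List (List Char)) :
    ∀ u v : List Char, (∀ r ∈ ps, ∀ j, j < u.length → ¬ r <+: (u ++ v).drop j) →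
      pvScan ps (u ++ v) = u ++ pvScan ps v := by
  intro u
  induction u with
  | nil => simp
  | cons c u' ih =>
    intro v h
    rw [List.cons_append, pvScan_neg ps c (u' ++ v) ?_]
    · rw [ih v (fun r hr j hj => by simpa using h r hr (j + 1) (by simp; omega))]
      simp
    · rw [List.find?_eq_none]
      intro r hr
      simpa [List.isPrefixOf_iff_prefix] using h r hr 0 (by simp)

theorem not_prefix_repc (q : List Char) :
    ∀ N s p', s.length ≤ N → ' ' ∉ p' → ¬ p' <+: s →
      ¬ p' <+: repc (q ++ ['=']) (q ++ [' ']) s := by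
  intro N
  induction N with
  | zero =>
    intro s p' hN hsp hnp
    have : s = [] := List.length_eq_zero_iff.mp (Nat.le_zero.mp hN)
    subst this
    simpa [repc_nil] using hnp
  | succ m ih =>
    intro s p' hN hsp hnp
    by_cases hps : (q ++ ['=']) <+: s
    · match s with
      | [] => exact absurd (List.prefix_nil.mp hps) (by simp)
      | c :: t =>
        rw [repc_pos _ _ c t (by simp) hps]
        intro hcontra
        by_cases hlen : p'.length ≤ q.length
        · have h1 : p' <+: q := by
            refine List.prefix_of_prefix_length_le hcontra ?_ (by simpa using hlen)
            exact ⟨[' '] ++ repc (q ++ ['=']) (q ++ [' ']) ((c :: t).drop (q ++ ['=']).length), by simp⟩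
          exact hnp (List.IsPrefix.trans (List.IsPrefix.trans h1 (List.prefix_append q ['='])) hps)
        · have h2 : (q ++ [' ']) <+: p' := by
            refine List.prefix_of_prefix_length_le ?_ hcontra (by simp; omega)
            simp
          exact hsp (h2.mem (by simp))
    · match s with
      | [] => simpa [repc_nil] using hnp
      | c :: t =>
        rw [repc_neg _ _ c t hps]
        intro hcontra
        match p', hcontra with
        | [], _ => exact hnp (List.nil_prefix)
        | d :: p't, hc =>
          rw [List.cons_prefix_cons] at hc
          obtain ⟨rfl, hc2⟩ := hc
          have hnt : ¬ p't <+: t := fun hh => hnp (List.cons_prefix_cons.mpr ⟨rfl, hh⟩)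
          exact ih t p't (by simpa using hN) (fun hm => hsp (List.mem_cons_of_mem _ hm)) hnt hc2

-- the shape shared by all six patterns: starts with "--", '=' exactly at the end,
-- no space/CR/LF, and "--" occurs only at position 0
def pvGoodPat (r : List Char) : Prop :=
  2 ≤ r.length ∧
  r[0]? = some '-' ∧ r[1]? = some '-' ∧
  (∀ j, j < r.length → (r[j]? = some '=' ↔ j = r.length - 1)) ∧
  (∀ j, j < r.length → r[j]? ≠ some ' ' ∧ r[j]? ≠ some '\r' ∧ r[j]? ≠ some '\n') ∧
  (∀ j, j < r.length → 0 < j → j + 1 < r.length → ¬(r[j]? = some '-' ∧ r[j+1]? = some '-'))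

theorem good_ne_nil {r : List Char} (h : pvGoodPat r) : r ≠ [] := by
  intro hr; subst hr; simpa using h.1

theorem good_not_mem {r : List Char} (h : pvGoodPat r) :
    ' ' ∉ r ∧ '\r' ∉ r ∧ '\n' ∉ r := by
  obtain ⟨-, -, -, -, h5, -⟩ := h
  refine ⟨fun hm => ?_, fun hm => ?_, fun hm => ?_⟩ <;>
  · obtain ⟨i, hg⟩ := List.mem_iff_getElem?.mp hm
    have hi : i < r.length := (List.getElem?_eq_some_iff.mp hg).1
    have := h5 i hi
    tauto

theorem good_concat {r : List Char} (h : pvGoodPat r) : r.dropLast ++ ['='] = r := by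
  apply List.dropLast_append_getLast?
  rw [List.getLast?_eq_getElem?]
  exact (h.2.2.2.1 (r.length - 1) (by have := h.1; omega)).mpr rfl

theorem prefix_getElem? {u w : List Char} (h : u <+: w) {j : ℕ} (hj : j < u.length) :
    w[j]? = u[j]? := by
  have hl := h.length_le
  rw [List.getElem?_eq_getElem hj, List.getElem?_eq_getElem (lt_of_lt_of_le hj hl)]
  exact congrArg some (h.getElem hj).symm

theorem prefix_drop_getElem? {p w : List Char} {j k : ℕ} (h : p <+: w.drop j)
    (hk : k < p.length) : w[j + k]? = p[k]? := by
  rw [← List.getElem?_drop]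
  exact prefix_getElem? h hk

-- no pattern matches at a position inside the emitted replacement "opt "
theorem pi1 {p r : List Char} (hp : pvGoodPat p) (hr : pvGoodPat r) (X : List Char) :
    ∀ j, j < (p.dropLast ++ [' ']).length → ¬ r <+: ((p.dropLast ++ [' ']) ++ X).drop j := by
  intro j hj h
  have hql : p.dropLast.length = p.length - 1 := List.length_dropLast
  have hjq : j ≤ p.dropLast.length := by simp at hj; omega
  have hrlen : 2 ≤ r.length := hr.1
  by_cases hcase : j + r.length ≤ p.dropLast.length
  · -- r would lie inside "opt", but r ends with '=' and opt has no '='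
    have hlast : r[r.length - 1]? = some '=' :=
      (hr.2.2.2.1 (r.length - 1) (by omega)).mpr rfl
    have hw : ((p.dropLast ++ [' ']) ++ X)[j + (r.length - 1)]? = some '=' := by
      rw [prefix_drop_getElem? h (by omega)]; exact hlast
    have hin : j + (r.length - 1) < p.dropLast.length := by omega
    have hw2 : ((p.dropLast ++ [' ']) ++ X)[j + (r.length - 1)]? = p[j + (r.length - 1)]? := by
      rw [List.getElem?_append_left (by simp; omega), List.getElem?_append_left (by omega),
        List.getElem?_dropLast, if_pos (by omega)]
    have := (hp.2.2.2.1 (j + (r.length - 1)) (by omega)).mp (by rw [← hw2, hw])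
    omega
  · -- r would cover the emitted space, but r contains no space
    have hsp : ((p.dropLast ++ [' ']) ++ X)[p.dropLast.length]? = some ' ' := by
      rw [List.getElem?_append_left (by simp)]
      simpa using List.getElem?_concat_length p.dropLast ' '
    have hk : p.dropLast.length - j < r.length := by omega
    have : r[p.dropLast.length - j]? = some ' ' := by
      rw [← prefix_drop_getElem? h hk]
      rw [show j + (p.dropLast.length - j) = p.dropLast.length by omega]
      exact hsp
    exact (hr.2.2.2.2.1 _ hk).1 this

-- the first needle matches nowhere inside a matched pattern r₀
theorem pi2 {p r₀ : List Char} (hp : pvGoodPat p) (hr₀ : pvGoodPat r₀) {s : List Char}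
    (hpref : r₀ <+: s) (hps : ¬ p <+: s) :
    ∀ j, j < r₀.length → ¬ p <+: s.drop j := by
  intro j hj h
  rcases Nat.eq_zero_or_pos j with rfl | hj0
  · simp at h; exact hps h
  · have hp0 : s[j + 0]? = some '-' := by
      rw [prefix_drop_getElem? h (by have := hp.1; omega)]; exact hp.2.1
    have hr0j : r₀[j]? = some '-' := by rw [← prefix_getElem? hpref hj]; simpa using hp0
    by_cases hlastj : j = r₀.length - 1
    · have : r₀[j]? = some '=' := (hr₀.2.2.2.1 j hj).mpr hlastj
      rw [this] at hr0j
      simp at hr0j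
    · have hj1 : j + 1 < r₀.length := by omega
      have hp1 : s[j + 1]? = some '-' := by
        rw [prefix_drop_getElem? h (by have := hp.1; omega)]; exact hp.2.2.1
      have hr1j : r₀[j + 1]? = some '-' := by rw [← prefix_getElem? hpref hj1]; exact hp1
      exact hr₀.2.2.2.2.2 j hj hj0 hj1 ⟨hr0j, hr1j⟩

-- a pattern that failed at the head of s still fails at the head of r₀ ++ w
theorem pi3 {r' r₀ : List Char} (hr' : pvGoodPat r') (hr₀ : pvGoodPat r₀) {s w : List Char}
    (hr₀s : r₀ <+: s) (hns : ¬ r' <+: s) : ¬ r' <+: r₀ ++ w := by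
  intro h
  by_cases hlen : r'.length ≤ r₀.length
  · exact hns ((List.prefix_of_prefix_length_le h (List.prefix_append r₀ w) hlen).trans hr₀s)
  · have h2 : r₀ <+: r' :=
      List.prefix_of_prefix_length_le (List.prefix_append r₀ w) h (by omega)
    have heq : r'[r₀.length - 1]? = some '=' := by
      rw [prefix_getElem? h2 (by have := hr₀.1; omega)]
      exact (hr₀.2.2.2.1 (r₀.length - 1) (by have := hr₀.1; omega)).mpr rfl
    have := (hr'.2.2.2.1 (r₀.length - 1) (by omega)).mp heq
    have := hr₀.1
    omega

-- one str.replace pass before a multi-pattern scan = the scan with the needle prepended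
theorem core_step (p : List Char) (ps : List (List Char)) (hp : pvGoodPat p)
    (hps : ∀ r ∈ ps, pvGoodPat r) :
    ∀ N s, s.length ≤ N →
      pvScan ps (repc p (p.dropLast ++ [' ']) s) = pvScan (p :: ps) s := by
  intro N
  induction N with
  | zero =>
    intro s hN
    have : s = [] := List.length_eq_zero_iff.mp (Nat.le_zero.mp hN)
    subst this
    simp [repc_nil, pvScan_nil]
  | succ m ih =>
    intro s hN
    match s with
    | [] => simp [repc_nil, pvScan_nil]
    | c :: t =>
      by_cases hcp : p <+: (c :: t)
      · rw [repc_pos _ _ c t (good_ne_nil hp) hcp]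
        rw [pvScan_append ps _ _ (fun r hr => pi1 hp (hps r hr) _)]
        rw [ih _ (by have h1 := hp.1; simp at hN ⊢; omega)]
        rw [pvScan_pos (p :: ps) c t p (good_ne_nil hp)
          (List.find?_cons_of_pos (List.isPrefixOf_iff_prefix.mpr hcp))]
      · rcases hf0 : ps.find? (fun r => r.isPrefixOf (c :: t)) with _ | r₀
        · -- no pattern matches at the head
          have hnone : (p :: ps).find? (fun r => r.isPrefixOf (c :: t)) = none := by
            rw [List.find?_cons_of_neg (by simpa [List.isPrefixOf_iff_prefix] using hcp), hf0]
          rw [repc_neg _ _ c t hcp]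
          have hLnone : ps.find? (fun r => r.isPrefixOf (c :: repc p (p.dropLast ++ [' ']) t)) = none := by
            rw [List.find?_eq_none]
            intro r hr hcon
            rw [List.isPrefixOf_iff_prefix] at hcon
            have hrs : ¬ r <+: (c :: t) := by
              have := List.find?_eq_none.mp hf0 r hr
              simpa [List.isPrefixOf_iff_prefix] using this
            have hnp := not_prefix_repc p.dropLast (m + 1) (c :: t) r hN
              (good_not_mem (hps r hr)).1 hrs
            rw [good_concat hp, repc_neg _ _ c t hcp] at hnp
            exact hnp hcon
          rw [pvScan_neg ps c _ hLnone, pvScan_neg (p :: ps) c t hnone]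
          rw [ih t (by simpa using hN)]
        · -- the first matching pattern r₀ ∈ ps
          have hfacts := List.find?_eq_some_iff_append.mp hf0
          have hr₀good := hps r₀ (by
            rcases hfacts.2 with ⟨as, bs, hsplit, -⟩
            rw [hsplit]; simp)
          have hr₀pre : r₀ <+: (c :: t) := List.isPrefixOf_iff_prefix.mp hfacts.1
          obtain ⟨v, hv⟩ := hr₀pre
          have hrw : repc p (p.dropLast ++ [' ']) (c :: t)
              = r₀ ++ repc p (p.dropLast ++ [' ']) v := by
            rw [← hv]
            exact repc_append p _ r₀ v (by rw [hv]; exact pi2 hp hr₀good ⟨v, hv⟩ hcp)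
          rw [hrw]
          -- LHS scan: the same r₀ matches first
          have hfL : ps.find? (fun r => r.isPrefixOf (r₀ ++ repc p (p.dropLast ++ [' ']) v)) = some r₀ := by
            rw [List.find?_eq_some_iff_append]
            refine ⟨List.isPrefixOf_iff_prefix.mpr (List.prefix_append _ _), ?_⟩
            rcases hfacts.2 with ⟨as, bs, hsplit, hearlier⟩
            refine ⟨as, bs, hsplit, fun a ha => ?_⟩
            have hna : ¬ a <+: (c :: t) := by
              have hb := hearlier a ha
              simp only [Bool.not_eq_true'] at hb
              rw [← List.isPrefixOf_iff_prefix]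
              simp [hb]
            have hagood := hps a (by rw [hsplit]; simp [ha])
            rw [Bool.not_eq_eq_eq_not, Bool.not_true, Bool.eq_false_iff, Ne,
              List.isPrefixOf_iff_prefix]
            exact pi3 hagood hr₀good ⟨v, hv⟩ hna (w := repc p (p.dropLast ++ [' ']) v)
          -- RHS find?: p fails, then r₀
          have hfR : (p :: ps).find? (fun r => r.isPrefixOf (c :: t)) = some r₀ := by
            rw [List.find?_cons_of_neg (by simpa [List.isPrefixOf_iff_prefix] using hcp), hf0]
          match r₀, hr₀good, hv, hfL, hfR with
          | rc :: rt, hr₀good, hv, hfL, hfR =>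
            rw [← hv]
            simp only [List.cons_append] at hfL ⊢
            rw [pvScan_pos ps rc (rt ++ repc p (p.dropLast ++ [' ']) v) (rc :: rt) (by simp) hfL]
            rw [pvScan_pos (p :: ps) rc (rt ++ v) (rc :: rt) (by simp)
              (by rw [← List.cons_append, hv]; exact hfR)]
            simp only [List.length_cons, List.drop_succ_cons, List.drop_left]
            rw [ih v (by
              have : ((rc :: rt) ++ v).length = (c :: t).length := by rw [hv]
              simp at this hN ⊢; omega)]

-- the six sequential replace passes collapse into the one multi-pattern scan
theorem foldl_repc_eq_pvScan :
    ∀ (ps : List (List Char)), (∀ r ∈ ps, pvGoodPat r) → ∀ s : List Char,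
      ps.foldl (fun c r => repc r (r.dropLast ++ [' ']) c) s = pvScan ps s := by
  intro ps
  induction ps with
  | nil =>
    intro _ s
    induction s with
    | nil => simp [pvScan_nil]
    | cons c t iht => rw [List.foldl_nil, pvScan_neg [] c t (by simp), ← iht]; rfl
  | cons p ps ih =>
    intro h s
    rw [List.foldl_cons, ih (fun r hr => h r (List.mem_cons_of_mem _ hr))]
    exact core_step p ps (h p List.mem_cons_self) (fun r hr => h r (List.mem_cons_of_mem _ hr))
      s.length s le_rfl

-- single-character replace is a map
def pvNorm (c : Char) : Char := if c = '\r' ∨ c = '\n' then ' ' else c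

theorem repc_single (a b : Char) :
    ∀ s : List Char, repc [a] [b] s = s.map (fun c => if c = a then b else c) := by
  intro s
  induction s with
  | nil => simp [repc_nil]
  | cons c t ih =>
    by_cases hc : c = a
    · subst hc
      rw [repc_pos [c] [b] c t (by simp) (by simp)]
      simp [ih]
    · rw [repc_neg [a] [b] c t (by simp [List.cons_prefix_cons]; exact fun h => hc h.symm)]
      simp [hc, ih]

theorem crlf_norm (s : List Char) :
    repc ['\n'] [' '] (repc ['\r'] [' '] s) = s.map pvNorm := by
  rw [repc_single, repc_single, List.map_map]
  apply List.map_congr_left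
  intro c _
  by_cases h1 : c = '\r' <;> by_cases h2 : c = '\n' <;> simp [pvNorm, Function.comp, h1, h2]

-- prefix transfer across pvNorm for pattern chars
theorem prefix_map_pvNorm {r : List Char} (hr : ' ' ∉ r ∧ '\r' ∉ r ∧ '\n' ∉ r) :
    ∀ w : List Char, (r <+: w.map pvNorm) ↔ (r <+: w) := by
  induction r with
  | nil => intro w; simp
  | cons a r' ih =>
    intro w
    match w with
    | [] => simp
    | c :: t =>
      rw [List.map_cons, List.cons_prefix_cons, List.cons_prefix_cons]
      have hih := ih ⟨fun hm => hr.1 (List.mem_cons_of_mem _ hm),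
        fun hm => hr.2.1 (List.mem_cons_of_mem _ hm),
        fun hm => hr.2.2 (List.mem_cons_of_mem _ hm)⟩ t
      have ha : a ≠ ' ' := fun h => hr.1 (h ▸ List.mem_cons_self)
      have har : ¬ (a = '\r' ∨ a = '\n') := by
        rintro (rfl | rfl)
        exacts [hr.2.1 List.mem_cons_self, hr.2.2 List.mem_cons_self]
      constructor
      · rintro ⟨h1, h2⟩
        refine ⟨?_, hih.mp h2⟩
        by_cases hc : c = '\r' ∨ c = '\n'
        · exact absurd h1 (by simp [pvNorm, hc, ha])
        · simpa [pvNorm, hc] using h1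
      · rintro ⟨rfl, h2⟩
        exact ⟨by simp [pvNorm, har], hih.mpr h2⟩

theorem good_map_id {r : List Char} (h : pvGoodPat r) :
    (r.dropLast ++ [' ']).map pvNorm = r.dropLast ++ [' '] := by
  obtain ⟨h1, h2, h3⟩ := good_not_mem h
  have hall : ∀ a ∈ r.dropLast ++ [' '], pvNorm a = a := by
    intro a ha
    rcases List.mem_append.mp ha with hd | hs
    · have ham := List.dropLast_subset r hd
      have : ¬(a = '\r' ∨ a = '\n') := by rintro (rfl | rfl); exacts [h2 ham, h3 ham]
      simp [pvNorm, this]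
    · simp at hs
      subst hs
      simp [pvNorm]
  have := List.map_congr_left (l := r.dropLast ++ [' ']) (f := pvNorm) (g := id) hall
  simpa using this

theorem find?_isPrefixOf_congr {x y : List Char} :
    ∀ ps : List (List Char), (∀ r ∈ ps, r.isPrefixOf x = r.isPrefixOf y) →
      ps.find? (fun p => p.isPrefixOf x) = ps.find? (fun p => p.isPrefixOf y) := by
  intro ps
  induction ps with
  | nil => intro _; rfl
  | cons q qs ihq =>
    intro h
    simp only [List.find?_cons, h q List.mem_cons_self]
    cases q.isPrefixOf y <;>
      simp [ihq (fun r hr => h r (List.mem_cons_of_mem _ hr))]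

theorem pvScan_map_pvNorm (ps : List (List Char)) (hps : ∀ r ∈ ps, pvGoodPat r) :
    ∀ N s, s.length ≤ N → pvScan ps (s.map pvNorm) = (pvScan ps s).map pvNorm := by
  intro N
  induction N with
  | zero =>
    intro s hN
    have : s = [] := List.length_eq_zero_iff.mp (Nat.le_zero.mp hN)
    subst this
    simp [pvScan_nil]
  | succ m ih =>
    intro s hN
    match s with
    | [] => simp [pvScan_nil]
    | c :: t =>
      have hfind : (ps.find? (fun p => p.isPrefixOf (pvNorm c :: t.map pvNorm)))
          = ps.find? (fun p => p.isPrefixOf (c :: t)) := by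
        apply find?_isPrefixOf_congr
        intro q hq
        have hiff := prefix_map_pvNorm (good_not_mem (hps q hq)) (c :: t)
        rw [List.map_cons] at hiff
        by_cases hh : q <+: (c :: t)
        · rw [List.isPrefixOf_iff_prefix.mpr hh, List.isPrefixOf_iff_prefix.mpr (hiff.mpr hh)]
        · rw [Bool.eq_iff_iff]
          simp [List.isPrefixOf_iff_prefix, hiff, hh]
      rcases hf : ps.find? (fun p => p.isPrefixOf (c :: t)) with _ | r₀
      · rw [List.map_cons, pvScan_neg ps _ _ (by rw [hfind]; exact hf), pvScan_neg ps c t hf]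
        rw [List.map_cons, ih t (by simpa using hN)]
      · have hr₀good := hps r₀ (List.mem_of_find?_eq_some hf)
        have hne := good_ne_nil hr₀good
        rw [List.map_cons, pvScan_pos ps _ _ r₀ hne (by rw [hfind]; exact hf),
          pvScan_pos ps c t r₀ hne hf]
        have hdrop : (pvNorm c :: t.map pvNorm).drop r₀.length
            = ((c :: t).drop r₀.length).map pvNorm := by
          rw [← List.map_cons, List.map_drop]
        rw [hdrop, ih _ (by have := hr₀good.1; simp at hN ⊢; omega)]
        rw [List.map_append, good_map_id hr₀good]

-- str.split() does not see the \r/\n → ' ' normalisation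
theorem split₀_go_map_pvNorm :
    ∀ (x cur : List Char) (accs : List (List Char)),
      PySem.Chars.split₀.go (x.map pvNorm) cur accs = PySem.Chars.split₀.go x cur accs := by
  intro x
  induction x with
  | nil => intro cur accs; rfl
  | cons c t ih =>
    intro cur accs
    rw [List.map_cons, PySem.Chars.split₀.go, PySem.Chars.split₀.go]
    have hsp : PySem.Chars.isspace (pvNorm c) = PySem.Chars.isspace c := by
      by_cases hc : c = '\r' ∨ c = '\n'
      · rcases hc with rfl | rfl <;> simp [pvNorm] <;> decide
      · simp [pvNorm, hc]
    rw [hsp]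
    by_cases hs : PySem.Chars.isspace c = true
    · simp only [hs, if_true]
      by_cases hcur : cur.isEmpty <;> simp [hcur, ih]
    · simp only [hs]
      have hcc : pvNorm c = c := by
        have : ¬ (c = '\r' ∨ c = '\n') := by
          rintro (rfl | rfl) <;> exact hs (by decide)
        simp [pvNorm, this]
      simp [hcc, ih]

theorem split₀_map_pvNorm (x : List Char) :
    PySem.Chars.split₀ (x.map pvNorm) = PySem.Chars.split₀ x := by
  rw [PySem.Chars.split₀, PySem.Chars.split₀, split₀_go_map_pvNorm]

theorem pvPats_good : ∀ r ∈ pvPats, pvGoodPat r := by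
  intro r hr
  simp only [pvPats, pvRegexAlts, List.map_cons, List.map_nil, List.mem_cons,
    List.not_mem_nil, or_false] at hr
  rcases hr with rfl | rfl | rfl | rfl | rfl | rfl <;> (unfold pvGoodPat; decide)

theorem pvAOpts_pats : pvAOpts.map (fun o => o.toList ++ ['=']) = pvPats := by decide

theorem foldA (opts : List String) :
    ∀ x : String,
      (opts.foldl (fun c o => PySem.Str.replace c (o ++ "=") (o ++ " ")) x).toList
        = (opts.map (fun o => o.toList ++ ['='])).foldl
            (fun c p => repc p (p.dropLast ++ [' ']) c) x.toList := by
  induction opts with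
  | nil => intro x; rfl
  | cons o os ih =>
    intro x
    rw [List.foldl_cons, List.map_cons, List.foldl_cons, ih]
    congr 1
    rw [PySem.Str.toList_replace, String.toList_append, String.toList_append]
    rw [show ("=" : String).toList = ['='] from rfl, show (" " : String).toList = [' '] from rfl]
    rw [replace_eq_repc _ _ _ (by simp), List.dropLast_concat]

set_option maxHeartbeats 1600000 in
theorem main_thm (args : String) : sanitize_spark_submit_args_py args = sanitize_spark_submit_args_py_alt args := by
  by_cases h : args = ""
  · subst h
    rw [sanitize_spark_submit_args_py, if_pos rfl, sanitize_spark_submit_args_py_alt]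
    rw [show ("" : String).toList = [] from rfl, pvScan_nil]
    apply String.toList_inj.mp
    rw [PySem.Str.toList_join, PySem.Str.split₀_map_toList,
      show (String.ofList ([] : List Char)).toList = [] by simp]
    decide
  · rw [sanitize_spark_submit_args_py, if_neg h, sanitize_spark_submit_args_py_alt]
    apply String.toList_inj.mp
    rw [PySem.Str.toList_join, PySem.Str.toList_join]
    rw [show (" " : String).toList = [' '] from rfl]
    rw [PySem.Str.split₀_map_toList, PySem.Str.split₀_map_toList]
    refine congrArg (PySem.Chars.join [' ']) ?_
    rw [foldA, pvAOpts_pats]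
    rw [PySem.Str.toList_replace, PySem.Str.toList_replace]
    rw [show ("\r" : String).toList = ['\r'] from rfl,
        show ("\n" : String).toList = ['\n'] from rfl,
        show (" " : String).toList = [' '] from rfl]
    rw [replace_eq_repc _ _ _ (by simp), replace_eq_repc _ _ _ (by simp)]
    rw [crlf_norm]
    rw [foldl_repc_eq_pvScan pvPats pvPats_good]
    rw [pvScan_map_pvNorm pvPats pvPats_good args.toList.length _ le_rfl]
    rw [split₀_map_pvNorm]
    rw [show (String.ofList (pvScan pvPats args.toList)).toList = pvScan pvPats args.toList by simp]

-- ===== VERDICT (by name: the statement is the Claim_ definition above) =====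
theorem sanitize_spark_submit_args_py_spec : Claim_equal_sanitize_spark_submit_args_py := by
  intro args _
  exact main_thm args
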